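-- pv_equiv track=rewrite | github.com/La-sociedad-del-silencio/TP2-Dinamica | codigo/algoritmo_cambio.py | eliminar_enemigos
-- ===== SOURCE A (Python) =====
-- CARGAR = "Cargar"
--
-- ATACAR = "Atacar"
--
-- def eliminar_enemigos(n,x, f):
--     enemigos_eliminados = [0] * (n + 1)
--
--     for minuto_actual in range(1, n + 1):
--         max_enemigos_eliminables = min(f[0], x[minuto_actual-1])
--         for minutos_desde_ultimo_ataque in range(0, minuto_actual):
--             enemigos_actuales = min(f[minutos_desde_ultimo_ataque], x[minuto_actual-1])
--             enemigos_ataque_anterior = enemigos_eliminados[minuto_actual-minutos_desde_ultimo_ataque-1]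
--
--             if enemigos_ataque_anterior + enemigos_actuales > max_enemigos_eliminables:
--                 max_enemigos_eliminables = enemigos_ataque_anterior + enemigos_actuales
--
--         enemigos_eliminados[minuto_actual] = max_enemigos_eliminables
--
--     max_enemigos = enemigos_eliminados[-1]
--     secuencia = obtener_secuencia_estrategias(x, f, enemigos_eliminados, n)
--     #secuencia = obtener_secuencia_estrategias_recur(x, f, enemigos_eliminados, n, n-1, [])
--     secuencia.reverse()
--     return (max_enemigos, secuencia)
--
-- def obtener_secuencia_estrategias(x, f, enemigos_eliminados, minuto_actual):
--     secuencia = []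
--     while minuto_actual > 0:
--         minutos_desde_ultimo_ataque = minuto_actual-1
--
--         while True:
--
--             enemigos_ataque_anterior = enemigos_eliminados[minuto_actual-minutos_desde_ultimo_ataque-1]
--             enemigos_actuales = min(f[minutos_desde_ultimo_ataque], x[minuto_actual-1])
--
--             if enemigos_ataque_anterior + enemigos_actuales == enemigos_eliminados[minuto_actual]:
--
--                 secuencia.append(ATACAR)
--                 minuto_actual = minuto_actual-minutos_desde_ultimo_ataque-1
--
--                 secuencia.extend([CARGAR]*minutos_desde_ultimo_ataque)
--
--                 break
--
--             minutos_desde_ultimo_ataque -= 1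
--     return secuencia
-- ===== SOURCE B (Python) =====
-- CARGAR = "Cargar"
--
-- ATACAR = "Atacar"
--
-- def eliminar_enemigos(n, x, f):
--     # Forward DP that also records, for each minute, the gap (minutes charged
--     # since the previous attack) that achieves the optimum; ties go to the
--     # largest gap (>= update while scanning gaps ascending).  The sequence is
--     # then read off the parent array directly, without re-scanning.
--     mejores = [0] * (n + 1)
--     padre = [0] * (n + 1)
--     for minuto in range(1, n + 1):
--         disparo = x[minuto - 1]
--         mejor = mejores[minuto - 1] + min(f[0], disparo)
--         mejor_gap = 0
--         for gap in range(1, minuto):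
--             candidato = mejores[minuto - gap - 1] + min(f[gap], disparo)
--             if candidato >= mejor:
--                 mejor = candidato
--                 mejor_gap = gap
--         mejores[minuto] = mejor
--         padre[minuto] = mejor_gap
--
--     secuencia = []
--     minuto = n
--     while minuto > 0:
--         gap = padre[minuto]
--         secuencia.append(ATACAR)
--         secuencia.extend([CARGAR] * gap)
--         minuto = minuto - gap - 1
--     secuencia.reverse()
--     return (mejores[n], secuencia)
-- ===== Notes on version B (the rewrite author's own statement) =====
-- stated objective: simpler
-- what changed: B records, during the forward DP, the gap chosen for each minute in a parent array (ascending scan with >= so ties keep the largest gap, matching A's descending re-scan) and reconstructs the sequence by following parent pointers, eliminating A's inner while-True search loop; Pre_ restricts to the natural domain (0 <= n <= len(x), len(f), nonnegative enemy/firepower counts in the used prefixes) because on negative counts A can raise IndexError, loop forever, or return a sequence found through Python negative-index wraparound.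
import Mathlib
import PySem

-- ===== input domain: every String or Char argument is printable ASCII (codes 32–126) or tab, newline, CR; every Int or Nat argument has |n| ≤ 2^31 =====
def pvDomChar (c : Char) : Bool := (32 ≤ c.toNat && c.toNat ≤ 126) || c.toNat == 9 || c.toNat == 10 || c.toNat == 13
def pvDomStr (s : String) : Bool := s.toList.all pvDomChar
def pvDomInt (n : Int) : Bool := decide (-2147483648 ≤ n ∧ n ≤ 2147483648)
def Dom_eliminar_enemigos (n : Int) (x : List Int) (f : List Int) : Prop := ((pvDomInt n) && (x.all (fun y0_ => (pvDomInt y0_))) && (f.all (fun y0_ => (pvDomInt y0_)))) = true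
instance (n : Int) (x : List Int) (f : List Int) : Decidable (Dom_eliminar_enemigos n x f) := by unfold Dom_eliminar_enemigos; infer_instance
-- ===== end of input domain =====

-- B replaces A's re-scanning reconstruction by a parent array filled during the
-- forward DP and read off directly (objective: simpler); equivalence is claimed
-- on the natural domain (Pre_): nonnegative counts, n within both list lengths.

-- ===== PORT A =====
def pvCARGAR : String := "Cargar"
def pvATACAR : String := "Atacar"

-- Python list indexing l[i]; every index is in range under Pre_, so the
-- default 0 is never used there and this is exact.
def pvIdx (l : List Int) (i : Nat) : Int := l.getD i 0
def pvIdxN (l : List Nat) (i : Nat) : Nat := l.getD i 0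

-- A's inner DP loop: best value after trying gaps 0..g for minute m, starting
-- from init = min(f[0], x[m-1]).
def pvAbest (x f E : List Int) (m : Nat) : Nat → Int
  | 0 =>
      if pvIdx E (m-1) + min (pvIdx f 0) (pvIdx x (m-1)) > min (pvIdx f 0) (pvIdx x (m-1))
      then pvIdx E (m-1) + min (pvIdx f 0) (pvIdx x (m-1))
      else min (pvIdx f 0) (pvIdx x (m-1))
  | g+1 =>
      if pvIdx E (m-(g+1)-1) + min (pvIdx f (g+1)) (pvIdx x (m-1)) > pvAbest x f E m g
      then pvIdx E (m-(g+1)-1) + min (pvIdx f (g+1)) (pvIdx x (m-1))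
      else pvAbest x f E m g

-- A's outer DP loop: enemigos_eliminados after minute m (length m+1)
def pvAtable (x f : List Int) : Nat → List Int
  | 0 => [0]
  | m+1 => pvAtable x f m ++ [pvAbest x f (pvAtable x f m) (m+1) m]

-- A's inner `while True` search, gap descending from g.  Under Pre_ the
-- equality always holds at some gap ≥ 0, so returning 0 at the base is only a
-- totalization guard (Python would continue into negative indices there).
def pvSearch (x f E : List Int) (m : Nat) : Nat → Nat
  | 0 => 0
  | g+1 =>
      if pvIdx E (m-(g+1)-1) + min (pvIdx f (g+1)) (pvIdx x (m-1)) = pvIdx E m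
      then g+1 else pvSearch x f E m g

-- A's `obtener_secuencia_estrategias` outer while-loop (sequence before reverse)
def pvRecon (x f E : List Int) : Nat → List String
  | 0 => []
  | m+1 =>
      (pvATACAR :: List.replicate (pvSearch x f E (m+1) m) pvCARGAR)
        ++ pvRecon x f E (m - pvSearch x f E (m+1) m)
  termination_by m => m
  decreasing_by omega

def eliminar_enemigos (n : Int) (x : List Int) (f : List Int) : Int × List String :=
  let E := pvAtable x f n.toNat
  let maxE := pvIdx E (E.length - 1)       -- enemigos_eliminados[-1]
  let sec := (pvRecon x f E n.toNat).reverse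
  (maxE, sec)

-- ===== PORT B =====
-- B's inner loop: (best value, best gap) after gaps 0..g; `≥` keeps the largest gap
def pvBbest (x f E : List Int) (m : Nat) : Nat → Int × Nat
  | 0 => (pvIdx E (m-1) + min (pvIdx f 0) (pvIdx x (m-1)), 0)
  | g+1 =>
      if pvIdx E (m-(g+1)-1) + min (pvIdx f (g+1)) (pvIdx x (m-1)) ≥ (pvBbest x f E m g).1
      then (pvIdx E (m-(g+1)-1) + min (pvIdx f (g+1)) (pvIdx x (m-1)), g+1)
      else pvBbest x f E m g

-- B's outer loop: (mejores, padre) after minute m (each of length m+1)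
def pvBtables (x f : List Int) : Nat → List Int × List Nat
  | 0 => ([0], [0])
  | m+1 =>
      ((pvBtables x f m).1 ++ [(pvBbest x f (pvBtables x f m).1 (m+1) m).1],
       (pvBtables x f m).2 ++ [(pvBbest x f (pvBtables x f m).1 (m+1) m).2])

-- B's reconstruction: follow the parent pointers
def pvBrecon (P : List Nat) : Nat → List String
  | 0 => []
  | m+1 =>
      (pvATACAR :: List.replicate (pvIdxN P (m+1)) pvCARGAR)
        ++ pvBrecon P (m - pvIdxN P (m+1))
  termination_by m => m
  decreasing_by omega

def eliminar_enemigos_alt (n : Int) (x : List Int) (f : List Int) : Int × List String :=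
  let t := pvBtables x f n.toNat
  (pvIdx t.1 n.toNat, (pvBrecon t.2 n.toNat).reverse)

-- ===== PRECONDITION & SPEC =====
-- Pre_ is the natural domain of the task (counts of enemies / firepower are
-- nonnegative, n minutes covered by both lists).  Outside it A may raise
-- IndexError, loop forever, or return a sequence found through Python's
-- negative-index wraparound — an artefact of its descending re-scan.
def Pre_eliminar_enemigos (n : Int) (x : List Int) (f : List Int) : Prop :=
  0 ≤ n ∧ n ≤ x.length ∧ n ≤ f.length ∧
  (∀ a ∈ x.take n.toNat, 0 ≤ a) ∧ (∀ a ∈ f.take n.toNat, 0 ≤ a)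
instance (n : Int) (x : List Int) (f : List Int) : Decidable (Pre_eliminar_enemigos n x f) := by
  unfold Pre_eliminar_enemigos; infer_instance

def pvWitness_eliminar_enemigos : Int × List Int × List Int := (3, ([2, 5, 1], [1, 3, 4]))

def Spec_eliminar_enemigos (n : Int) (x : List Int) (f : List Int) (out : Int × List String) : Prop := out = eliminar_enemigos_alt n x f
instance (n : Int) (x : List Int) (f : List Int) (out : Int × List String) : Decidable (Spec_eliminar_enemigos n x f out) := by unfold Spec_eliminar_enemigos; infer_instance

-- ===== CLAIM (what is proved, stated in full; the proofs are below) =====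
def Claim_equal_eliminar_enemigos : Prop := ∀ (n : Int) (x : List Int) (f : List Int), Dom_eliminar_enemigos n x f → Pre_eliminar_enemigos n x f → Spec_eliminar_enemigos n x f (eliminar_enemigos n x f)

-- ===== LEMMAS AND PROOFS =====

theorem pv_nonneg_idx (l : List Int) (N i : Nat) (h : ∀ a ∈ l.take N, 0 ≤ a)
    (hi : i < N) (hl : i < l.length) : 0 ≤ pvIdx l i := by
  have hlen : i < (l.take N).length := by
    simp [List.length_take]
    omega
  have e : pvIdx l i = (l.take N)[i] := by
    unfold pvIdx
    rw [List.getD_eq_getElem _ 0 hl]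
    simp
  rw [e]
  exact h _ (List.getElem_mem hlen)

theorem pv_idx_snoc (l : List Int) (v : Int) (i : Nat) (hi : i = l.length) :
    pvIdx (l ++ [v]) i = v := by
  subst hi
  unfold pvIdx
  have h : l.length < (l ++ [v]).length := by simp
  rw [List.getD_eq_getElem _ 0 h]
  simp

theorem pv_idxN_snoc (l : List Nat) (v : Nat) (i : Nat) (hi : i = l.length) :
    pvIdxN (l ++ [v]) i = v := by
  subst hi
  unfold pvIdxN
  have h : l.length < (l ++ [v]).length := by simp
  rw [List.getD_eq_getElem _ 0 h]
  simp

theorem pv_idx_append (l l' : List Int) (i : Nat) (hi : i < l.length) :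
    pvIdx (l ++ l') i = pvIdx l i := by
  unfold pvIdx
  exact List.getD_append _ _ _ _ hi

theorem pv_idxN_append (l l' : List Nat) (i : Nat) (hi : i < l.length) :
    pvIdxN (l ++ l') i = pvIdxN l i := by
  unfold pvIdxN
  exact List.getD_append _ _ _ _ hi

theorem pvAbest_eq_fst (x f E : List Int) (m : Nat) (hE : 0 ≤ pvIdx E (m-1)) :
    ∀ g, pvAbest x f E m g = (pvBbest x f E m g).1 := by
  intro g
  induction g with
  | zero =>
      simp only [pvAbest, pvBbest]
      split_ifs with h <;> omega
  | succ g ih =>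
      simp only [pvAbest, pvBbest]
      rw [ih]
      split_ifs with h1 h2 <;> (try dsimp only) <;> omega
  
theorem pvBbest_fst_ge (x f E : List Int) (m : Nat) :
    ∀ g, pvIdx E (m-1) + min (pvIdx f 0) (pvIdx x (m-1)) ≤ (pvBbest x f E m g).1 := by
  intro g
  induction g with
  | zero => simp [pvBbest]
  | succ g ih =>
      simp only [pvBbest]
      split_ifs with h <;> (try dsimp only) <;> omega

theorem pvAtable_length (x f : List Int) : ∀ m, (pvAtable x f m).length = m + 1 := by
  intro m
  induction m with
  | zero => rfl
  | succ m ih => simp [pvAtable, ih]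

theorem pvBtables_length1 (x f : List Int) : ∀ m, (pvBtables x f m).1.length = m + 1 := by
  intro m
  induction m with
  | zero => rfl
  | succ m ih => simp [pvBtables, ih]

theorem pvBtables_length2 (x f : List Int) : ∀ m, (pvBtables x f m).2.length = m + 1 := by
  intro m
  induction m with
  | zero => rfl
  | succ m ih => simp [pvBtables, ih]

theorem pvAtable_idx_prefix (x f : List Int) (m i : Nat) (hi : i ≤ m) :
    ∀ k, m ≤ k → pvIdx (pvAtable x f k) i = pvIdx (pvAtable x f m) i := by
  intro k
  induction k with
  | zero =>
      intro hmk
      have hm0 : m = 0 := Nat.le_zero.mp hmk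
      subst hm0
      rfl
  | succ k ih =>
      intro hmk
      rcases Nat.eq_or_lt_of_le hmk with h | h
      · subst h; rfl
      · have hmk' : m ≤ k := by omega
        rw [← ih hmk']
        show pvIdx (pvAtable x f k ++ _) i = _
        rw [pv_idx_append]
        rw [pvAtable_length]
        omega

theorem pvBtables_idx2_prefix (x f : List Int) (m i : Nat) (hi : i ≤ m) :
    ∀ k, m ≤ k → pvIdxN (pvBtables x f k).2 i = pvIdxN (pvBtables x f m).2 i := by
  intro k
  induction k with
  | zero =>
      intro hmk
      have hm0 : m = 0 := Nat.le_zero.mp hmk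
      subst hm0
      rfl
  | succ k ih =>
      intro hmk
      rcases Nat.eq_or_lt_of_le hmk with h | h
      · subst h; rfl
      · have hmk' : m ≤ k := by omega
        rw [← ih hmk']
        show pvIdxN ((pvBtables x f k).2 ++ _) i = _
        rw [pv_idxN_append]
        rw [pvBtables_length2]
        omega

theorem pvTables_eq (x f : List Int) (N : Nat)
    (hx : N ≤ x.length) (hf : N ≤ f.length)
    (hxn : ∀ a ∈ x.take N, 0 ≤ a) (hfn : ∀ a ∈ f.take N, 0 ≤ a) :
    ∀ m, m ≤ N → pvAtable x f m = (pvBtables x f m).1 ∧ (∀ v ∈ (pvBtables x f m).1, 0 ≤ v) := by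
  intro m
  induction m with
  | zero =>
      intro _
      refine ⟨rfl, ?_⟩
      intro v hv
      simp [pvBtables] at hv
      omega
  | succ m ih =>
      intro hm
      obtain ⟨he, hnn⟩ := ih (by omega)
      have hlen : (pvBtables x f m).1.length = m + 1 := pvBtables_length1 x f m
      have hEm : 0 ≤ pvIdx (pvBtables x f m).1 m := by
        have hm' : m < (pvBtables x f m).1.length := by omega
        unfold pvIdx
        rw [List.getD_eq_getElem _ 0 hm']
        exact hnn _ (List.getElem_mem hm')
      have hEm' : 0 ≤ pvIdx (pvBtables x f m).1 ((m+1)-1) := by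
        simpa using hEm
      have hx0 : 0 ≤ pvIdx x ((m+1)-1) := by
        simp only [Nat.add_sub_cancel]
        exact pv_nonneg_idx x N m hxn (by omega) (by omega)
      have hf0 : 0 ≤ pvIdx f 0 := pv_nonneg_idx f N 0 hfn (by omega) (by omega)
      have hval := pvBbest_fst_ge x f (pvBtables x f m).1 (m+1) m
      constructor
      · show pvAtable x f m ++ _ = (pvBtables x f m).1 ++ _
        rw [he]
        congr 1
        rw [pvAbest_eq_fst x f (pvBtables x f m).1 (m+1) hEm' m]
      · intro v hv
        rw [show (pvBtables x f (m+1)).1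
              = (pvBtables x f m).1 ++ [(pvBbest x f (pvBtables x f m).1 (m+1) m).1] from rfl] at hv
        rw [List.mem_append] at hv
        rcases hv with hv | hv
        · exact hnn v hv
        · simp at hv
          subst hv
          have hmin : 0 ≤ min (pvIdx f 0) (pvIdx x ((m+1)-1)) := le_min hf0 hx0
          omega

theorem pvSearch_eq_snd (x f E T : List Int) (m : Nat)
    (hpre : ∀ j, j < m → pvIdx T j = pvIdx E j) :
    ∀ g, g < m → pvIdx T m = (pvBbest x f E m g).1 →
      pvSearch x f T m g = (pvBbest x f E m g).2 := by
  intro g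
  induction g with
  | zero =>
      intro _ _
      simp [pvSearch, pvBbest]
  | succ g ih =>
      intro hgm ht
      have hidx : m - (g+1) - 1 < m := by omega
      have hTE : pvIdx T (m-(g+1)-1) = pvIdx E (m-(g+1)-1) := hpre _ hidx
      rw [pvBbest] at ht
      rw [pvSearch, pvBbest]
      by_cases h : pvIdx E (m-(g+1)-1) + min (pvIdx f (g+1)) (pvIdx x (m-1)) ≥ (pvBbest x f E m g).1
      · rw [if_pos h] at ht
        rw [if_pos h, if_pos (by rw [hTE, ht])]
      · rw [if_neg h] at ht
        rw [if_neg h, if_neg (by intro hc; rw [hTE, ht] at hc; omega)]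
        exact ih (by omega) ht

theorem pvParent_eq_search (x f : List Int) (N : Nat)
    (hx : N ≤ x.length) (hf : N ≤ f.length)
    (hxn : ∀ a ∈ x.take N, 0 ≤ a) (hfn : ∀ a ∈ f.take N, 0 ≤ a)
    (m : Nat) (hm1 : 1 ≤ m) (hmN : m ≤ N) :
    pvIdxN (pvBtables x f N).2 m = pvSearch x f (pvAtable x f N) m (m-1) := by
  obtain ⟨m', rfl⟩ : ∃ m', m = m' + 1 := ⟨m - 1, by omega⟩
  obtain ⟨he, hnn⟩ := pvTables_eq x f N hx hf hxn hfn m' (by omega)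
  have hlen1 : (pvBtables x f m').1.length = m' + 1 := pvBtables_length1 x f m'
  have hEm : 0 ≤ pvIdx (pvBtables x f m').1 ((m'+1)-1) := by
    simp only [Nat.add_sub_cancel]
    have hm'' : m' < (pvBtables x f m').1.length := by omega
    unfold pvIdx
    rw [List.getD_eq_getElem _ 0 hm'']
    exact hnn _ (List.getElem_mem hm'')
  have hP : pvIdxN (pvBtables x f N).2 (m'+1)
      = (pvBbest x f (pvBtables x f m').1 (m'+1) m').2 := by
    rw [pvBtables_idx2_prefix x f (m'+1) (m'+1) le_rfl N hmN]
    rw [show (pvBtables x f (m'+1)).2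
          = (pvBtables x f m').2 ++ [(pvBbest x f (pvBtables x f m').1 (m'+1) m').2] from rfl]
    exact pv_idxN_snoc _ _ _ (by rw [pvBtables_length2])
  have hpref : ∀ j, j < m' + 1 → pvIdx (pvAtable x f N) j = pvIdx (pvBtables x f m').1 j := by
    intro j hj
    rw [pvAtable_idx_prefix x f m' j (by omega) N (by omega), he]
  have hT : pvIdx (pvAtable x f N) (m'+1) = (pvBbest x f (pvBtables x f m').1 (m'+1) m').1 := by
    rw [pvAtable_idx_prefix x f (m'+1) (m'+1) le_rfl N hmN]
    rw [show pvAtable x f (m'+1)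
          = pvAtable x f m' ++ [pvAbest x f (pvAtable x f m') (m'+1) m'] from rfl]
    rw [pv_idx_snoc _ _ _ (by rw [pvAtable_length])]
    rw [he]
    exact pvAbest_eq_fst x f (pvBtables x f m').1 (m'+1) hEm m'
  rw [hP]
  simp only [Nat.add_sub_cancel]
  exact (pvSearch_eq_snd x f (pvBtables x f m').1 (pvAtable x f N) (m'+1) hpref m'
    (by omega) hT).symm

theorem pvRecon_eq (x f : List Int) (N : Nat)
    (hx : N ≤ x.length) (hf : N ≤ f.length)
    (hxn : ∀ a ∈ x.take N, 0 ≤ a) (hfn : ∀ a ∈ f.take N, 0 ≤ a) :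
    ∀ m, m ≤ N → pvRecon x f (pvAtable x f N) m = pvBrecon (pvBtables x f N).2 m := by
  intro m
  induction m using Nat.strong_induction_on with
  | _ m ih =>
    intro hmN
    match m, ih with
    | 0, _ => simp [pvRecon, pvBrecon]
    | m'+1, ih =>
      have hps := pvParent_eq_search x f N hx hf hxn hfn (m'+1) (by omega) hmN
      have hps' : pvIdxN (pvBtables x f N).2 (m'+1)
          = pvSearch x f (pvAtable x f N) (m'+1) m' := by
        simpa using hps
      rw [pvRecon, pvBrecon, hps']
      congr 1
      exact ih (m' - pvSearch x f (pvAtable x f N) (m'+1) m') (by omega) (by omega)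

-- ===== VERDICT (by name: the statement is the Claim_ definition above) =====
theorem eliminar_enemigos_spec : Claim_equal_eliminar_enemigos := by
  intro n x f _ hpre
  obtain ⟨hn, hnx, hnf, hxn, hfn⟩ := hpre
  have hx : n.toNat ≤ x.length := by omega
  have hf' : n.toNat ≤ f.length := by omega
  obtain ⟨hteq, _⟩ := pvTables_eq x f n.toNat hx hf' hxn hfn n.toNat le_rfl
  show (_, _) = (_, _)
  simp only [Prod.mk.injEq]
  constructor
  · rw [pvAtable_length x f n.toNat]
    simp only [Nat.add_sub_cancel]
    rw [hteq]
  · rw [pvRecon_eq x f n.toNat hx hf' hxn hfn n.toNat le_rfl]
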